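-- pv_equiv track=rewrite | github.com/morpheuskn/Trabalhos-de-Computa-o-1 | .github/workflows/envio de pacotes.py | envio
-- ===== SOURCE A (Python) =====
-- def envio (dias,chips,chipac):
--   pacotes = 0
--   resto = 0
--   chipspdia = [chips] * dias
--   pacotespdia = []
--   vezes = 0
--   producaopdia = 0
--   pacotenviados = 0
--   while vezes < dias:
--     producaopdia = chipspdia [vezes] + resto
--     pacotenviados = producaopdia // chipac
--     pacotespdia.append (pacotenviados)
--     pacotes += pacotenviados
--     resto = producaopdia % chipac
--     vezes += 1
--   return pacotes
-- ===== SOURCE B (Python) =====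
-- def envio(dias, chips, chipac):
--     # Closed form: carrying the remainder forward day by day sends
--     # floor(total production / package size) packages overall.
--     if dias <= 0:
--         return 0
--     return (chips * dias) // chipac
-- ===== Notes on version B (the rewrite author's own statement) =====
-- stated objective: faster
-- what changed: Replaced the day-by-day simulation loop (per-day division with carried remainder) by the closed form (chips*dias)//chipac, since the carried remainder makes the total equal to one floor division of the total production.
import Mathlib
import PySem

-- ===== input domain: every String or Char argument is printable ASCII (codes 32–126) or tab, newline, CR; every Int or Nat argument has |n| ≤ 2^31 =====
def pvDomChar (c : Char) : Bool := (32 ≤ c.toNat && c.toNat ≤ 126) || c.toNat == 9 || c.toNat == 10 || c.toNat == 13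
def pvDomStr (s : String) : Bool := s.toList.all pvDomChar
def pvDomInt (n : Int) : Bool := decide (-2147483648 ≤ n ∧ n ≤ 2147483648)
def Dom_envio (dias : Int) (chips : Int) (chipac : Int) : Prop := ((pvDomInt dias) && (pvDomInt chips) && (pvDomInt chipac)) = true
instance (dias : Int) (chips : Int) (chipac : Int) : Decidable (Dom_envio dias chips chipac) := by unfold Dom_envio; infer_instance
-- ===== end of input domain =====

-- B replaces A's day-by-day simulation loop by the O(1) closed form (chips*dias)//chipac.


-- ===== PORT A =====
-- the while loop; fuel = number of remaining iterations (dias - vezes).toNat.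
-- chipspdia[vezes] is ported with pyGetD (vezes is always in range: the loop runs
-- exactly len(chipspdia) times, so the default is never used).
def envioLoopA (chipspdia : List Int) (chipac : Int) (fuel : Nat) (vezes : Int)
    (pacotes : Int) (resto : Int) (pacotespdia : List Int) : Int :=
  match fuel with
  | 0 => pacotes
  | n + 1 =>
    let producaopdia := PySem.List.pyGetD chipspdia vezes 0 + resto
    let pacotenviados := PySem.Int.floordiv producaopdia chipac
    envioLoopA chipspdia chipac n (vezes + 1) (pacotes + pacotenviados)
      (PySem.Int.mod producaopdia chipac) (pacotespdia ++ [pacotenviados])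

def envio (dias : Int) (chips : Int) (chipac : Int) : Int :=
  envioLoopA (List.replicate dias.toNat chips) chipac dias.toNat 0 0 0 []

-- ===== PORT B =====
def envio_alt (dias : Int) (chips : Int) (chipac : Int) : Int :=
  if dias ≤ 0 then 0 else PySem.Int.floordiv (chips * dias) chipac

-- ===== PRECONDITION & SPEC =====
-- A raises ZeroDivisionError when the loop body runs (dias > 0) with chipac = 0.
def Pre_envio (dias : Int) (chips : Int) (chipac : Int) : Prop := dias ≤ 0 ∨ chipac ≠ 0
instance (dias : Int) (chips : Int) (chipac : Int) : Decidable (Pre_envio dias chips chipac) := by unfold Pre_envio; infer_instance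
def pvWitness_envio : Int × Int × Int := (4, 7, 3)
def Spec_envio (dias : Int) (chips : Int) (chipac : Int) (out : Int) : Prop := out = envio_alt dias chips chipac
instance (dias : Int) (chips : Int) (chipac : Int) (out : Int) : Decidable (Spec_envio dias chips chipac out) := by unfold Spec_envio; infer_instance

-- ===== CLAIM (what is proved, stated in full; the proofs are below) =====
def Claim_equal_envio : Prop := ∀ (dias : Int) (chips : Int) (chipac : Int), Dom_envio dias chips chipac → Pre_envio dias chips chipac → Spec_envio dias chips chipac (envio dias chips chipac)

-- ===== LEMMAS AND PROOFS =====

-- (a.fmod c).fdiv c = 0: the carried remainder contributes no whole package by itself.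
theorem fmod_fdiv_zero (a c : Int) (hc : c ≠ 0) : (a.fmod c).fdiv c = 0 := by
  have hm : a.fmod c = a + (-(a.fdiv c)) * c := by
    have := Int.mul_fdiv_add_fmod a c
    linarith
  rw [hm, Int.add_mul_fdiv_right _ _ hc]
  ring

-- Loop invariant: with every day's production equal to `chips`, chipac ≠ 0, and a
-- carried remainder resto with resto//chipac = 0, running `fuel` more iterations
-- leaves pacotes + (resto + chips*fuel)//chipac.
theorem envioLoopA_eq (chipac : Int) (hc : chipac ≠ 0) (fuel : Nat) (L : Nat) (chips : Int)
    (vezes : Int) (hv : 0 ≤ vezes) (hvL : vezes + fuel ≤ L)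
    (pacotes resto : Int) (hr : resto.fdiv chipac = 0) (acc : List Int) :
    envioLoopA (List.replicate L chips) chipac fuel vezes pacotes resto acc
      = pacotes + (resto + chips * fuel).fdiv chipac := by
  induction fuel generalizing vezes pacotes resto acc with
  | zero => simp [envioLoopA, hr]
  | succ n ih =>
    rw [envioLoopA]
    have hget : PySem.List.pyGetD (List.replicate L chips) vezes 0 = chips := by
      rw [PySem.List.pyGetD_eq_getElem _ 0 hv (by simp; omega)]
      simp
    rw [hget]
    show envioLoopA (List.replicate L chips) chipac n (vezes + 1)
        (pacotes + (chips + resto).fdiv chipac) ((chips + resto).fmod chipac)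
        (acc ++ [(chips + resto).fdiv chipac])
      = pacotes + (resto + chips * ((n : Int) + 1)).fdiv chipac
    rw [ih (vezes + 1) (by omega) (by push_cast at hvL ⊢; omega)
        _ _ (fmod_fdiv_zero _ _ hc)]
    have hm : (chips + resto).fmod chipac
        = chips + resto + (-(chips + resto).fdiv chipac) * chipac := by
      have := Int.mul_fdiv_add_fmod (chips + resto) chipac
      linarith
    rw [hm,
        show chips + resto + -(chips + resto).fdiv chipac * chipac + chips * (n : Int)
          = (resto + chips * ((n : Int) + 1)) + (-(chips + resto).fdiv chipac) * chipac by ring,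
        Int.add_mul_fdiv_right _ _ hc]
    ring

-- ===== VERDICT (by name: the statement is the Claim_ definition above) =====
theorem envio_spec : Claim_equal_envio := by
  intro dias chips chipac _ hpre
  unfold Spec_envio envio envio_alt
  by_cases hd : dias ≤ 0
  · have : dias.toNat = 0 := by omega
    simp [this, envioLoopA, hd]
  · have hc : chipac ≠ 0 := hpre.resolve_left hd
    rw [envioLoopA_eq chipac hc dias.toNat dias.toNat chips 0 le_rfl (by omega) _ _ (by simp [Int.zero_fdiv])]
    rw [if_neg hd]
    have hd' : ((dias.toNat : Int)) = dias := by omega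
    show 0 + ((0 : Int) + chips * (dias.toNat : Int)).fdiv chipac
      = PySem.Int.floordiv (chips * dias) chipac
    rw [hd']
    simp [PySem.Int.floordiv]
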